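-- pv_equiv track=rewrite | github.com/habmin/palette-generator | palette.py | create_complimentary
-- ===== SOURCE A (Python) =====
-- def create_complimentary(color_list, size):
--     palette_list = []
--
--     inverse = [abs(color_list[0] - 255), abs(color_list[1] - 255), abs(color_list[2] - 255)]
--
--     for i in range(size):
--         if i == size - 1:
--             palette_list.append(inverse)
--         else:
--             cell = [abs(color_list[0] - ((color_list[0] - inverse[0]) // (size - 1)) * i),
--                     abs(color_list[1] - ((color_list[1] - inverse[1]) // (size - 1)) * i),
--                     abs(color_list[2] - ((color_list[2] - inverse[2]) // (size - 1)) * i)]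
--             palette_list.append(cell)
--     return palette_list
-- ===== SOURCE B (Python) =====
-- def create_complimentary(color_list, size):
--     inverse = [abs(color_list[0] - 255), abs(color_list[1] - 255), abs(color_list[2] - 255)]
--     if size > 1:
--         step = [(color_list[j] - inverse[j]) // (size - 1) for j in range(3)]
--     else:
--         step = [0, 0, 0]
--     cur = [color_list[0], color_list[1], color_list[2]]
--     palette = []
--     for i in range(size):
--         if i == size - 1:
--             palette.append(inverse)
--         else:
--             palette.append([abs(cur[0]), abs(cur[1]), abs(cur[2])])
--             cur = [cur[0] - step[0], cur[1] - step[1], cur[2] - step[2]]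
--     return palette
-- ===== Notes on version B (the rewrite author's own statement) =====
-- stated objective: alternative
-- what changed: B precomputes the per-channel step once (guarded so size==1 never divides by zero) and maintains a running accumulator vector decremented by the step each iteration, instead of A recomputing the floor-division step and the color-step*i product from the index inside every loop iteration.
import Mathlib
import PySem

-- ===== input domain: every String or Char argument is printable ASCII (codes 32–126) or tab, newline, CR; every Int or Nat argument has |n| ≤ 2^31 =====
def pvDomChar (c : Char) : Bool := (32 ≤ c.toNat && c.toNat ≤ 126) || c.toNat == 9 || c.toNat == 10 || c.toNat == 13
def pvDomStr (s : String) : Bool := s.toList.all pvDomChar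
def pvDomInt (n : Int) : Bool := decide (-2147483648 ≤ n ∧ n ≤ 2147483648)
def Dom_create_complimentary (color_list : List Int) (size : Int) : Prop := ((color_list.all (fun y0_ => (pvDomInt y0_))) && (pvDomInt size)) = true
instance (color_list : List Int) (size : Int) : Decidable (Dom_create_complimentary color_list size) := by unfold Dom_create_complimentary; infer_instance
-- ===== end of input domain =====

-- B replaces A's per-index formula |c - step*i| by a running accumulator that is
-- initialised to the color and decremented by a per-channel step each iteration (objective: alternative).

-- ===== PORT A =====
def create_complimentary (color_list : List Int) (size : Int) : List (List Int) :=
  match PySem.List.pyGet? color_list 0, PySem.List.pyGet? color_list 1, PySem.List.pyGet? color_list 2 with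
  | some c0, some c1, some c2 =>
    let inv0 := |c0 - 255|
    let inv1 := |c1 - 255|
    let inv2 := |c2 - 255|
    (PySem.List.pyRange 0 size 1).foldl (fun acc i =>
      if i = size - 1 then acc ++ [[inv0, inv1, inv2]]
      else acc ++ [[|c0 - PySem.Int.floordiv (c0 - inv0) (size - 1) * i|,
                    |c1 - PySem.Int.floordiv (c1 - inv1) (size - 1) * i|,
                    |c2 - PySem.Int.floordiv (c2 - inv2) (size - 1) * i|]]) []
  | _, _, _ => []  -- unreachable under Pre_ (Python raises IndexError)

-- ===== PORT B =====
def create_complimentary_alt (color_list : List Int) (size : Int) : List (List Int) :=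
  -- color_list[0], color_list[1], color_list[2] read by list destructuring (B raises the same IndexError in Python; outside Pre_)
  match color_list with
  | c0 :: c1 :: c2 :: _ =>
    let inv0 := |c0 - 255|
    let inv1 := |c1 - 255|
    let inv2 := |c2 - 255|
    let s0 := if 1 < size then PySem.Int.floordiv (c0 - inv0) (size - 1) else 0
    let s1 := if 1 < size then PySem.Int.floordiv (c1 - inv1) (size - 1) else 0
    let s2 := if 1 < size then PySem.Int.floordiv (c2 - inv2) (size - 1) else 0
    ((PySem.List.pyRange 0 size 1).foldl (fun st i =>
      if i = size - 1 then (st.1 ++ [[inv0, inv1, inv2]], st.2)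
      else (st.1 ++ [[|st.2.1|, |st.2.2.1|, |st.2.2.2|]],
            (st.2.1 - s0, st.2.2.1 - s1, st.2.2.2 - s2)))
      (([] : List (List Int)), (c0, c1, c2))).1
  | _ => []  -- fewer than 3 channels: outside Pre_

-- ===== PRECONDITION & SPEC =====
-- Pre_ excludes exactly the inputs where A raises IndexError: fewer than 3 channels.
def Pre_create_complimentary (color_list : List Int) (size : Int) : Prop := 3 ≤ color_list.length
instance (color_list : List Int) (size : Int) : Decidable (Pre_create_complimentary color_list size) := by unfold Pre_create_complimentary; infer_instance
def pvWitness_create_complimentary : List Int × Int := ([10, 200, 30], 4)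
def Spec_create_complimentary (color_list : List Int) (size : Int) (out : List (List Int)) : Prop := out = create_complimentary_alt color_list size
instance (color_list : List Int) (size : Int) (out : List (List Int)) : Decidable (Spec_create_complimentary color_list size out) := by unfold Spec_create_complimentary; infer_instance

-- ===== CLAIM (what is proved, stated in full; the proofs are below) =====
def Claim_equal_create_complimentary : Prop := ∀ (color_list : List Int) (size : Int), Dom_create_complimentary color_list size → Pre_create_complimentary color_list size → Spec_create_complimentary color_list size (create_complimentary color_list size)

-- ===== LEMMAS AND PROOFS =====

-- The core loop equivalence: A's per-index formula vs B's running accumulator,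
-- for a fixed step triple used on both sides.
lemma loop_eq (c0 c1 c2 inv0 inv1 inv2 s0 s1 s2 size : Int) :
    ∀ (n : Nat) (a : Int) (acc : List (List Int)), (size - a).toNat = n →
    (PySem.List.pyRange a size 1).foldl (fun acc i =>
      if i = size - 1 then acc ++ [[inv0, inv1, inv2]]
      else acc ++ [[|c0 - s0 * i|, |c1 - s1 * i|, |c2 - s2 * i|]]) acc =
    ((PySem.List.pyRange a size 1).foldl (fun st i =>
      if i = size - 1 then (st.1 ++ [[inv0, inv1, inv2]], st.2)
      else (st.1 ++ [[|st.2.1|, |st.2.2.1|, |st.2.2.2|]],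
            (st.2.1 - s0, st.2.2.1 - s1, st.2.2.2 - s2)))
      (acc, (c0 - s0 * a, c1 - s1 * a, c2 - s2 * a))).1 := by
  intro n
  induction n with
  | zero =>
    intro a acc h
    rw [PySem.List.pyRange_one_eq_nil (by omega)]; rfl
  | succ n ih =>
    intro a acc h
    rw [PySem.List.pyRange_one_cons (by omega)]
    simp only [List.foldl_cons]
    by_cases hlast : a = size - 1
    · rw [if_pos hlast, if_pos hlast, PySem.List.pyRange_one_eq_nil (by omega)]; rfl
    · rw [if_neg hlast, if_neg hlast]
      have e0 : c0 - s0 * a - s0 = c0 - s0 * (a + 1) := by ring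
      have e1 : c1 - s1 * a - s1 = c1 - s1 * (a + 1) := by ring
      have e2 : c2 - s2 * a - s2 = c2 - s2 * (a + 1) := by ring
      simp only [e0, e1, e2]
      exact ih (a + 1) _ (by omega)

-- ===== VERDICT (by name: the statement is the Claim_ definition above) =====
theorem create_complimentary_spec : Claim_equal_create_complimentary := by
  intro color_list size _ hpre
  unfold Spec_create_complimentary
  unfold Pre_create_complimentary at hpre
  match color_list, hpre with
  | c0 :: c1 :: c2 :: rest, _ =>
    unfold create_complimentary create_complimentary_alt
    have g0 : PySem.List.pyGet? (c0 :: c1 :: c2 :: rest) 0 = some c0 := by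
      simp [pysem]
    have g1 : PySem.List.pyGet? (c0 :: c1 :: c2 :: rest) 1 = some c1 := by
      simp [pysem]
    have g2 : PySem.List.pyGet? (c0 :: c1 :: c2 :: rest) 2 = some c2 := by
      simp [pysem]
    rw [g0, g1, g2]
    simp only []
    by_cases hs : 1 < size
    · simp only [if_pos hs]
      have := loop_eq c0 c1 c2 |c0 - 255| |c1 - 255| |c2 - 255|
        (PySem.Int.floordiv (c0 - |c0 - 255|) (size - 1))
        (PySem.Int.floordiv (c1 - |c1 - 255|) (size - 1))
        (PySem.Int.floordiv (c2 - |c2 - 255|) (size - 1))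
        size (size).toNat 0 [] (by omega)
      simpa using this
    · -- size ≤ 1 : the loop is empty or its only index is the last one
      simp only [if_neg hs]
      rcases lt_or_ge size 1 with h1 | h1
      · rw [PySem.List.pyRange_one_eq_nil (by omega)]; rfl
      · have hsz : size = 1 := by omega
        subst hsz
        norm_num [PySem.List.pyRange_one_cons, PySem.List.pyRange_one_eq_nil]
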